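-- pv_equiv track=rewrite | github.com/kangguangli/cryptography | ppu.py | tcpOptionLayer
-- ===== SOURCE A (Python) =====
-- def tcpOptionLayer(op: dict):
--     data = {
--         # "EOL": 0,
--         # "NOP": 1,
--         "MSS": None,
--         "WScale": None,
--         "SAckOK": None,
--         "SAck": None,
--         "Timestamp": None,
--         "AltChkSum": None,
--         "AltChkSumOpt": None,
--         "Mood": None,
--         "UTO": None,
--         "TFO": None,
--     }
--     for key, item in op.items():
--         if key in data:
--             data[key] = item
--         else:
--             pass
--
--     return data
-- ===== SOURCE B (Python) =====
-- _KNOWN_KEYS = ("MSS", "WScale", "SAckOK", "SAck", "Timestamp",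
--                "AltChkSum", "AltChkSumOpt", "Mood", "UTO", "TFO")
--
--
-- def tcpOptionLayer(op: dict):
--     return {k: op.get(k) for k in _KNOWN_KEYS}
-- ===== Notes on version B (the rewrite author's own statement) =====
-- stated objective: idiomatic
-- what changed: B iterates over the fixed 10-key schema and pulls each value with op.get(k), instead of iterating over the input and testing membership in a mutable template dict; the input is never traversed and the if/else branch disappears.
import Mathlib
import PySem

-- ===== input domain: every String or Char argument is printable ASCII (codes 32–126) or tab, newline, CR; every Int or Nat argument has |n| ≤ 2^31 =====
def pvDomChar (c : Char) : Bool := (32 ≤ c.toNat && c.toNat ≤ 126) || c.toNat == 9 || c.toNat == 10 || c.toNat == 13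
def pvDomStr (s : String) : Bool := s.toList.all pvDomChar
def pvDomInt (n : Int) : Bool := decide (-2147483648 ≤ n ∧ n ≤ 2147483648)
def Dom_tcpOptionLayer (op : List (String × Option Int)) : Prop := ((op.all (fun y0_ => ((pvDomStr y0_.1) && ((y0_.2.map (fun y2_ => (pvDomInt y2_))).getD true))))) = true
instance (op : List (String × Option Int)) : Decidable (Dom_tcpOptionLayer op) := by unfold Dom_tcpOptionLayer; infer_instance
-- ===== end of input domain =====

-- B builds the result by mapping over the fixed 10-key schema with op.get, instead of
-- looping over the input with a membership test into a mutable template (objective: idiomatic).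


-- ===== PORT A =====
-- the template dict A starts from (all known keys mapped to None)
def pvTemplate : PySem.Dict String (Option Int) :=
  PySem.Dict.ofList
    [("MSS", none), ("WScale", none), ("SAckOK", none), ("SAck", none), ("Timestamp", none),
     ("AltChkSum", none), ("AltChkSumOpt", none), ("Mood", none), ("UTO", none), ("TFO", none)]

def tcpOptionLayer (op : List (String × Option Int)) : List (String × Option Int) :=
  -- for key, item in op.items(): if key in data: data[key] = item else: pass
  (op.foldl (fun d kv => if d.contains kv.1 then d.insert kv.1 kv.2 else d) pvTemplate).items

-- ===== PORT B =====
def pvKnownKeys : List String :=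
  ["MSS", "WScale", "SAckOK", "SAck", "Timestamp",
   "AltChkSum", "AltChkSumOpt", "Mood", "UTO", "TFO"]

def tcpOptionLayer_alt (op : List (String × Option Int)) : List (String × Option Int) :=
  -- {k: op.get(k) for k in _KNOWN_KEYS}
  let d : PySem.Dict String (Option Int) := PySem.Dict.ofList op
  pvKnownKeys.map (fun k => (k, d.getD k none))

-- ===== PRECONDITION & SPEC =====
def Spec_tcpOptionLayer (op : List (String × Option Int)) (out : List (String × Option Int)) : Prop := out = tcpOptionLayer_alt op
instance (op : List (String × Option Int)) (out : List (String × Option Int)) : Decidable (Spec_tcpOptionLayer op out) := by unfold Spec_tcpOptionLayer; infer_instance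

-- ===== CLAIM (what is proved, stated in full; the proofs are below) =====
def Claim_equal_tcpOptionLayer : Prop := ∀ (op : List (String × Option Int)), Dom_tcpOptionLayer op → Spec_tcpOptionLayer op (tcpOptionLayer op)

-- ===== LEMMAS AND PROOFS =====

-- A's guarded-update loop never changes the key set
theorem pv_fold_step_keys (op : List (String × Option Int)) :
    ∀ (d : PySem.Dict String (Option Int)),
      (op.foldl (fun d kv => if d.contains kv.1 then d.insert kv.1 kv.2 else d) d).keys = d.keys := by
  induction op with
  | nil => intro d; rfl
  | cons kv rest ih =>
    intro d
    simp only [List.foldl_cons]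
    by_cases h : d.contains kv.1 = true
    · rw [if_pos h, ih, PySem.Dict.keys_insert_of_contains _ _ h]
    · rw [if_neg h, ih]

-- the value A's loop leaves at an already-present key k, as a scalar last-write fold
theorem pv_fold_step_getD (op : List (String × Option Int)) :
    ∀ (d : PySem.Dict String (Option Int)) (k : String), d.contains k = true →
      (op.foldl (fun d kv => if d.contains kv.1 then d.insert kv.1 kv.2 else d) d).getD k none
        = op.foldl (fun v kv => if kv.1 == k then kv.2 else v) (d.getD k none) := by
  induction op with
  | nil => intro d k _; rfl
  | cons kv rest ih =>
    intro d k hk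
    simp only [List.foldl_cons]
    by_cases h : d.contains kv.1 = true
    · rw [if_pos h]
      by_cases hkk : kv.1 = k
      · subst hkk
        rw [ih _ _ (by simp [PySem.Dict.contains_insert_self])]
        simp [PySem.Dict.getD_insert_self]
      · rw [ih _ _ (by simp [PySem.Dict.contains_insert, hk])]
        rw [PySem.Dict.getD_insert_of_ne _ _ _ (Ne.symm hkk)]
        simp [hkk]
    · rw [if_neg h]
      rw [ih _ _ hk]
      have hkk : kv.1 ≠ k := by intro e; rw [e] at h; exact h hk
      simp [hkk]

-- the value of dict(op) at k (B's op.get(k)), as the same scalar last-write fold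
theorem pv_fold_insert_getD (op : List (String × Option Int)) :
    ∀ (d : PySem.Dict String (Option Int)) (k : String),
      (op.foldl (fun d kv => d.insert kv.1 kv.2) d).getD k none
        = op.foldl (fun v kv => if kv.1 == k then kv.2 else v) (d.getD k none) := by
  induction op with
  | nil => intro d k; rfl
  | cons kv rest ih =>
    intro d k
    simp only [List.foldl_cons]
    rw [ih]
    by_cases hkk : kv.1 = k
    · subst hkk; simp [PySem.Dict.getD_insert_self]
    · rw [PySem.Dict.getD_insert_of_ne _ _ _ (Ne.symm hkk)]
      simp [hkk]

-- facts about the literal template, checked by the kernel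
theorem pv_template_keys : pvTemplate.keys = pvKnownKeys ∧ pvTemplate.keys.Nodup := by decide

theorem pv_template_at (k : String) (hk : k ∈ pvKnownKeys) :
    pvTemplate.contains k = true ∧ pvTemplate.getD k none = none := by
  fin_cases hk <;> exact ⟨by decide, by decide⟩

-- ===== VERDICT (by name: the statement is the Claim_ definition above) =====
theorem tcpOptionLayer_spec : Claim_equal_tcpOptionLayer := by
  intro op _
  show tcpOptionLayer op = tcpOptionLayer_alt op
  unfold tcpOptionLayer tcpOptionLayer_alt
  rw [PySem.Dict.items_eq_map_keys _ (by rw [pv_fold_step_keys]; exact pv_template_keys.2) none]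
  rw [pv_fold_step_keys, pv_template_keys.1]
  apply List.map_congr_left
  intro k hk
  obtain ⟨hc, hv⟩ := pv_template_at k hk
  rw [pv_fold_step_getD op pvTemplate k hc, hv]
  have : (PySem.Dict.ofList op : PySem.Dict String (Option Int))
      = op.foldl (fun d kv => d.insert kv.1 kv.2) PySem.Dict.empty := rfl
  rw [this, pv_fold_insert_getD]
  rfl
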